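-- pv_equiv track=rewrite | github.com/cemathey/aoc_2015 | day15/day15.py | get_recipe_portion_combinations
-- ===== SOURCE A (Python) =====
-- from itertools import combinations_with_replacement, permutations
-- from typing import Dict, Iterator, List, NamedTuple, Sequence, Tuple
--
-- class Ingredient(NamedTuple):
--     name: str
--     properties: Dict[str, int]
--
-- def get_recipe_portion_combinations(
--     ingredients: Sequence[Ingredient],
--     recipe_size_limit: int = 100,
-- ) -> Iterator[Tuple[int, ...]]:
--     """Generate all the possible ways to add N ingredients together to make our recipe limit."""
--
--     for combo in combinations_with_replacement(
--         range(recipe_size_limit + 1), len(ingredients)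
--     ):
--         # Restrict any invalid recipe sizes since we'll be generating permutations
--         # which will dramatically increase the search space
--         if sum(combo) == recipe_size_limit:
--             yield combo
-- ===== SOURCE B (Python) =====
-- def get_recipe_portion_combinations(ingredients, recipe_size_limit=100):
--     """Generate all the possible ways to add N ingredients together to make our recipe limit."""
--
--     def rec(min_value, remaining, k):
--         if k == 0:
--             if remaining == 0:
--                 yield ()
--             return
--         # each of the k values is at least min_value and nondecreasing,
--         # so the next value v satisfies v * k <= remaining
--         for v in range(min_value, remaining // k + 1):
--             for rest in rec(v, remaining - v, k - 1):
--                 yield (v,) + rest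
--
--     yield from rec(0, recipe_size_limit, len(ingredients))
-- ===== Notes on version B (the rewrite author's own statement) =====
-- stated objective: faster
-- what changed: Instead of enumerating all combinations_with_replacement of range(limit+1) and filtering by sum, B recursively builds only the nondecreasing tuples that sum to the limit, bounding each next value v by remaining//k.
import Mathlib
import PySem

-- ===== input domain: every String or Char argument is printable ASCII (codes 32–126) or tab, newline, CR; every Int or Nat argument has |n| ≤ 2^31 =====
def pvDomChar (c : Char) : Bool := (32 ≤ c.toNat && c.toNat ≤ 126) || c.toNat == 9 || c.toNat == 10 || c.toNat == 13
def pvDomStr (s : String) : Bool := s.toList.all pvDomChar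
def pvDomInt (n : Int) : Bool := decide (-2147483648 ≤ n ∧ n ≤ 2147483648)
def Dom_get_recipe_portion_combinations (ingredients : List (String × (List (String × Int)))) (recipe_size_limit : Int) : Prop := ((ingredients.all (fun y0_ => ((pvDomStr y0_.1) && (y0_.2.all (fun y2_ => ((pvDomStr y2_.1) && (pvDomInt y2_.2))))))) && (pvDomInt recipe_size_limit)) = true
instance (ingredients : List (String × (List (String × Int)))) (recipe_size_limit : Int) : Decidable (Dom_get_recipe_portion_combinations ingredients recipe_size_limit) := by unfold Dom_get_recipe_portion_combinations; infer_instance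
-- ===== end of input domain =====

-- B replaces the generate-and-filter over all combinations_with_replacement by a direct
-- recursive enumeration of the nondecreasing tuples summing to the limit (objective: faster).
-- Both are generators in Python; equivalence is about the sequence of yielded tuples.

-- ===== PORT A =====
-- hand port of itertools.combinations_with_replacement(pool, k), in itertools' lexicographic
-- order (exact: first element paired with all continuations, then the tail pool)
def pvCwr : List Int → Nat → List (List Int)
  | _, 0 => [[]]
  | [], _ + 1 => []
  | x :: rest, k + 1 => ((pvCwr (x :: rest) k).map (fun t => x :: t)) ++ pvCwr rest (k + 1)
  termination_by xs k => (k, xs.length)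

-- for combo in cwr(range(limit+1), len(ingredients)): if sum(combo) == limit: yield combo
def get_recipe_portion_combinations (ingredients : List (String × (List (String × Int)))) (recipe_size_limit : Int) : List (List Int) :=
  (pvCwr (PySem.List.pyRange 0 (recipe_size_limit + 1) 1) ingredients.length).filter
    (fun combo => combo.sum == recipe_size_limit)

-- ===== PORT B =====
-- rec(min_value, remaining, k) of Source B: next value v ranges over min_value .. remaining // k
def pvRec : Int → Int → Nat → List (List Int)
  | _, remaining, 0 => if remaining = 0 then [[]] else []
  | min_value, remaining, k + 1 =>
      (PySem.List.pyRange min_value (PySem.Int.floordiv remaining (k + 1) + 1) 1).flatMap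
        (fun v => (pvRec v (remaining - v) k).map (fun rest => v :: rest))

def get_recipe_portion_combinations_alt (ingredients : List (String × (List (String × Int)))) (recipe_size_limit : Int) : List (List Int) :=
  pvRec 0 recipe_size_limit ingredients.length

-- ===== PRECONDITION & SPEC =====
def Spec_get_recipe_portion_combinations (ingredients : List (String × (List (String × Int)))) (recipe_size_limit : Int) (out : List (List Int)) : Prop := out = get_recipe_portion_combinations_alt ingredients recipe_size_limit
instance (ingredients : List (String × (List (String × Int)))) (recipe_size_limit : Int) (out : List (List Int)) : Decidable (Spec_get_recipe_portion_combinations ingredients recipe_size_limit out) := by unfold Spec_get_recipe_portion_combinations; infer_instance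

-- ===== CLAIM (what is proved, stated in full; the proofs are below) =====
def Claim_equal_get_recipe_portion_combinations : Prop := ∀ (ingredients : List (String × (List (String × Int)))) (recipe_size_limit : Int), Dom_get_recipe_portion_combinations ingredients recipe_size_limit → Spec_get_recipe_portion_combinations ingredients recipe_size_limit (get_recipe_portion_combinations ingredients recipe_size_limit)

-- ===== LEMMAS AND PROOFS =====

lemma pvCwr_zero (xs : List Int) : pvCwr xs 0 = [[]] := by
  cases xs <;> simp [pvCwr]

-- B's recursion yields nothing when the budget is below min_value * k
lemma pvRec_eq_nil (k : Nat) : ∀ (m r : Int), r < m * k → pvRec m r k = [] := by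
  intro m r h
  cases k with
  | zero =>
      have h' : r < 0 := by simpa using h
      simp only [pvRec]
      rw [if_neg (by omega)]
  | succ k =>
      have hpos : (0:Int) < (k:Int) + 1 := by positivity
      have hv : PySem.Int.floordiv r ((k:Int)+1) < m := by
        rw [PySem.Int.floordiv_lt_iff_lt_mul hpos]
        push_cast at h
        linarith
      simp only [pvRec]
      rw [PySem.List.pyRange_one_eq_nil (by omega)]
      simp

-- main lemma: filtering the cwr of the pool [m, M] equals B's direct recursion
lemma cwr_filter (k : Nat) : ∀ (n : Nat) (m M r : Int), 0 ≤ m → r ≤ M → (M + 1 - m).toNat = n →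
    (pvCwr (PySem.List.pyRange m (M + 1) 1) k).filter (fun t => t.sum == r) = pvRec m r k := by
  induction k with
  | zero =>
      intro n m M r _ _ _
      rw [pvCwr_zero]
      by_cases h : r = 0
      · subst h; simp [pvRec]
      · simp [pvRec, h, Ne.symm h]
  | succ k ih =>
      intro n
      induction n using Nat.strong_induction_on with
      | _ n ihn =>
        intro m M r hm hr hn
        by_cases hpool : M + 1 ≤ m
        · -- empty pool: both sides are []
          rw [PySem.List.pyRange_one_eq_nil hpool]
          rw [pvRec_eq_nil (k+1) m r (by push_cast; nlinarith)]
          simp [pvCwr]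
        · push_neg at hpool
          have hcons := PySem.List.pyRange_one_cons (a := m) (b := M + 1) (by omega)
          rw [hcons]
          simp only [pvCwr]
          rw [← hcons, List.filter_append, List.filter_map]
          -- first block: tuples starting with m
          have h1 : (pvCwr (PySem.List.pyRange m (M+1) 1) k).filter
              ((fun t => t.sum == r) ∘ (fun t => m :: t))
              = (pvCwr (PySem.List.pyRange m (M+1) 1) k).filter (fun t => t.sum == r - m) := by
            apply List.filter_congr
            intro t _
            simp only [Function.comp_apply, List.sum_cons]
            by_cases hs : t.sum = r - m
            · rw [hs]
              simp [show m + (r - m) = r by ring]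
            · rw [beq_eq_false_iff_ne.mpr hs,
                  beq_eq_false_iff_ne.mpr (show m + t.sum ≠ r by omega)]
          rw [h1, ih n m M (r - m) hm (by omega) hn]
          -- second block: tail pool m+1 .. M
          rw [ihn ((M + 1 - (m+1)).toNat) (by omega) (m+1) M r (by omega) hr rfl]
          -- peel the first value from B's recursion
          have hpos : (0:Int) < (k:Int) + 1 := by positivity
          by_cases hv : m ≤ PySem.Int.floordiv r ((k:Int)+1)
          · conv_rhs => rw [pvRec]
            rw [PySem.List.pyRange_one_cons
              (show m < PySem.Int.floordiv r ((k:Int)+1) + 1 by omega)]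
            rw [List.flatMap_cons]
            congr 1
          · push_neg at hv
            have hlt : r < m * ((k:Int) + 1) :=
              lt_of_lt_of_le ((PySem.Int.floordiv_lt_iff_lt_mul hpos).mp hv) (by nlinarith)
            rw [pvRec_eq_nil k m (r - m) (by nlinarith)]
            rw [pvRec_eq_nil (k+1) m r (by push_cast; linarith)]
            rw [pvRec_eq_nil (k+1) (m+1) r (by push_cast; nlinarith)]
            simp

-- ===== VERDICT (by name: the statement is the Claim_ definition above) =====
theorem get_recipe_portion_combinations_spec : Claim_equal_get_recipe_portion_combinations := by
  intro ingredients limit _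
  unfold Spec_get_recipe_portion_combinations get_recipe_portion_combinations get_recipe_portion_combinations_alt
  exact cwr_filter ingredients.length (limit + 1 - 0).toNat 0 limit limit le_rfl le_rfl rfl
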